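-- pv_equiv track=rewrite | github.com/awildlogan/bookbot | main.py | character_counting_function
-- ===== SOURCE A (Python) =====
-- def character_counting_function(text): # this function counts characters and returns a count via dictionary
--     char_dict = {}
--     for char in text:
--         lowered = char.lower()
--         if lowered in char_dict:
--             char_dict[lowered] += 1
--         else:
--             char_dict[lowered] = 1
--     return char_dict
-- ===== SOURCE B (Python) =====
-- def character_counting_function(text):
--     lowered = [c.lower() for c in text]
--     return {ch: lowered.count(ch) for ch in dict.fromkeys(lowered)}
-- ===== Notes on version B (the rewrite author's own statement) =====
-- stated objective: alternative
-- what changed: Replaces the one-pass dict accumulation with a two-phase decomposition: lowercase everything once, take the distinct characters in first-seen order (dict.fromkeys), and build the result as a comprehension counting each distinct character with list.count.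
import Mathlib
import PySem

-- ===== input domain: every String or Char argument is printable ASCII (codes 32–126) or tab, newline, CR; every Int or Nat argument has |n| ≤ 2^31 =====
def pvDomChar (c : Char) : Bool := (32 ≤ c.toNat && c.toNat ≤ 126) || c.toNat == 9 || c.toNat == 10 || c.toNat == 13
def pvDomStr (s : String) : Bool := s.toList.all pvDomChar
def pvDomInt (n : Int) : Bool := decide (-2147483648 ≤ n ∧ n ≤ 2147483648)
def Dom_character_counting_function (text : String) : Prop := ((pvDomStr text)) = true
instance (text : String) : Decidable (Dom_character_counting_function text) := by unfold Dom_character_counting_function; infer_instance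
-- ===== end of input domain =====

-- B replaces A's one-pass dict accumulation by: lowercase once, dedup in first-seen order, count each distinct char (objective: alternative decomposition, same result).

-- ===== PORT A =====
def character_counting_function (text : String) : List (String × Int) :=
  (text.toList.foldl (fun (d : PySem.Dict String Int) char =>
      let lowered := PySem.Str.lower (String.singleton char)
      match d.get? lowered with
      | some n => d.insert lowered (n + 1)
      | none   => d.insert lowered 1)
    PySem.Dict.empty).items

-- ===== PORT B =====
def character_counting_function_alt (text : String) : List (String × Int) :=
  let lowered := text.toList.map (fun c => PySem.Str.lower (String.singleton c))
  (PySem.List.dedup lowered).map (fun ch => (ch, (lowered.count ch : Int)))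

-- ===== PRECONDITION & SPEC =====
def Spec_character_counting_function (text : String) (out : List (String × Int)) : Prop := out = character_counting_function_alt text
instance (text : String) (out : List (String × Int)) : Decidable (Spec_character_counting_function text out) := by unfold Spec_character_counting_function; infer_instance

-- ===== CLAIM (what is proved, stated in full; the proofs are below) =====
def Claim_equal_character_counting_function : Prop := ∀ (text : String), Dom_character_counting_function text → Spec_character_counting_function text (character_counting_function text)

-- ===== LEMMAS AND PROOFS =====

-- A's if-in-dict branch is exactly Dict.modify with default 0 and (· + 1)
theorem pv_step_eq_modify (d : PySem.Dict String Int) (x : String) :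
    (match d.get? x with
     | some n => d.insert x (n + 1)
     | none   => d.insert x 1) = d.modify x 0 (· + 1) := by
  cases h : d.get? x <;> simp [PySem.Dict.modify, PySem.Dict.getD, h]

theorem pv_fold_eq_counter (l : List Char) :
    l.foldl (fun (d : PySem.Dict String Int) char =>
      let lowered := PySem.Str.lower (String.singleton char)
      match d.get? lowered with
      | some n => d.insert lowered (n + 1)
      | none   => d.insert lowered 1) PySem.Dict.empty
    = PySem.Dict.counter (l.map (fun c => PySem.Str.lower (String.singleton c))) := by
  rw [PySem.Dict.counter_eq_foldl]
  rw [List.foldl_map]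
  generalize (PySem.Dict.empty : PySem.Dict String Int) = d
  induction l generalizing d with
  | nil => rfl
  | cons c t ih => rw [List.foldl_cons, pv_step_eq_modify]; exact ih _

-- ===== VERDICT (by name: the statement is the Claim_ definition above) =====
theorem character_counting_function_spec : Claim_equal_character_counting_function := by
  intro text _
  unfold Spec_character_counting_function character_counting_function character_counting_function_alt
  rw [pv_fold_eq_counter, PySem.Dict.items_counter]
  simp [PySem.List.dedup_eq_ofList]
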